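-- pv_equiv track=rewrite | github.com/Mitix-EPI/Epitech-All-Projects | Tek2/Math/201yams/bonus/src/Yams/Combination.py | checkSmallStraight
-- ===== SOURCE A (Python) =====
-- def checkSmallStraight(dies):
--     diesCopy = dies.copy()
--     numberStraight = 0
--     beforeSmallest = 0
--
--     while len(diesCopy) > 0:
--         smallest = diesCopy[0]
--         index = 0
--         ind = 0
--         for i in diesCopy:
--             if ind == index:
--                 ind += 1
--                 continue
--             if i < smallest:
--                 index = ind
--                 smallest = i
--             ind += 1
--         if beforeSmallest == 0:
--             numberStraight = 1
--         elif beforeSmallest + 1 == smallest: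
--             numberStraight += 1
--         else:
--             numberStraight = 1
--         if numberStraight >= 4:
--             break
--         del diesCopy[index]
--         beforeSmallest = smallest
--     if numberStraight >= 4:
--         return 30
--     return 0
-- ===== SOURCE B (Python) =====
-- def checkSmallStraight(dies):
--     run = 0
--     prev = 0
--     for v in sorted(dies):
--         if prev == 0:
--             run = 1
--         elif prev + 1 == v:
--             run += 1
--         else:
--             run = 1
--         if run >= 4:
--             return 30
--         prev = v
--     return 0
-- ===== Notes on version B (the rewrite author's own statement) =====
-- stated objective: faster
-- what changed: Replaces A's repeated selection-of-minimum with deletion (quadratic selection sort in disguise) by a single sort followed by one linear scan counting the run of consecutive values.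
import Mathlib
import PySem

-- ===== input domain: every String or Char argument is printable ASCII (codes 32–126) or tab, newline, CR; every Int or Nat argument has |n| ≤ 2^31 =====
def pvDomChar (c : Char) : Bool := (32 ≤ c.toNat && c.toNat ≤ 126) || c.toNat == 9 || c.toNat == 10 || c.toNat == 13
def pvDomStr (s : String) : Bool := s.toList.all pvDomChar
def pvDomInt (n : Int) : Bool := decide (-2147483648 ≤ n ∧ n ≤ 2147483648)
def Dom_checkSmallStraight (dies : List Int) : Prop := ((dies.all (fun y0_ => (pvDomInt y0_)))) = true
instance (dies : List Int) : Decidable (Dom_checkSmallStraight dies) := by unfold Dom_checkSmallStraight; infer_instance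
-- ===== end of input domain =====

-- B changes the algorithm: one sort then one linear scan, instead of A's repeated
-- minimum-selection with deletion (objective: faster, asymptotic).

-- ===== PORT A =====
-- inner for-loop: scan with (smallest, index) state and running position `ind`
def cssFindMin : List Int → Int → Int → Int → Int × Int
  | [], s, idx, _ => (s, idx)
  | i :: rest, s, idx, ind =>
      if ind == idx then cssFindMin rest s idx (ind + 1)
      else if i < s then cssFindMin rest i ind (ind + 1)
      else cssFindMin rest s idx (ind + 1)

-- while-loop; fuel = initial length (each pass deletes one element, so it never runs out).
-- `del diesCopy[index]` is `eraseIdx index.toNat`, exact since 0 ≤ index < len always holds here.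
def cssLoop : Nat → List Int → Int → Int → Int
  | fuel + 1, x :: xs, numberStraight, beforeSmallest =>
      let r := cssFindMin (x :: xs) x 0 0
      let ns' := if beforeSmallest == 0 then 1
                 else if beforeSmallest + 1 == r.1 then numberStraight + 1
                 else 1
      if ns' ≥ 4 then 30
      else cssLoop fuel ((x :: xs).eraseIdx r.2.toNat) ns' r.1
  | _, _, numberStraight, _ => if numberStraight ≥ 4 then 30 else 0

def checkSmallStraight (dies : List Int) : Int := cssLoop dies.length dies 0 0

-- ===== PORT B =====
def cssScan : List Int → Int → Int → Int
  | [], _, _ => 0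
  | v :: rest, run, prev =>
      let run' := if prev == 0 then 1 else if prev + 1 == v then run + 1 else 1
      if run' ≥ 4 then 30 else cssScan rest run' v

def checkSmallStraight_alt (dies : List Int) : Int :=
  cssScan (PySem.List.sorted dies (fun x => x) false) 0 0

-- ===== PRECONDITION & SPEC =====
def Spec_checkSmallStraight (dies : List Int) (out : Int) : Prop := out = checkSmallStraight_alt dies
instance (dies : List Int) (out : Int) : Decidable (Spec_checkSmallStraight dies out) := by unfold Spec_checkSmallStraight; infer_instance

-- ===== CLAIM (what is proved, stated in full; the proofs are below) =====
def Claim_equal_checkSmallStraight : Prop := ∀ (dies : List Int), Dom_checkSmallStraight dies → Spec_checkSmallStraight dies (checkSmallStraight dies)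

-- ===== LEMMAS AND PROOFS =====

theorem cssFoldlMin_le (l : List Int) : ∀ (s : Int), l.foldl min s ≤ s ∧ ∀ y ∈ l, l.foldl min s ≤ y := by
  induction l with
  | nil => intro s; simp
  | cons i rest ih =>
    intro s
    obtain ⟨h1, h2⟩ := ih (min s i)
    refine ⟨le_trans h1 (min_le_left _ _), ?_⟩
    intro y hy
    rcases List.mem_cons.mp hy with h | h
    · rw [h]; exact le_trans h1 (min_le_right _ _)
    · exact h2 y h

theorem cssFindMin_spec (l : List Int) : ∀ (pre : List Int) (s : Int) (idx : Nat),
    idx < pre.length → (pre ++ l)[idx]? = some s →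
    ∃ j : Nat, cssFindMin l s (↑idx) (↑pre.length) = (l.foldl min s, (↑j : Int)) ∧
      j < (pre ++ l).length ∧ (pre ++ l)[j]? = some (l.foldl min s) := by
  induction l with
  | nil =>
    intro pre s idx hlt hget
    exact ⟨idx, by simp [cssFindMin], by simpa using hlt, by simpa using hget⟩
  | cons i rest ih =>
    intro pre s idx hlt hget
    have hne : ((↑pre.length : Int) == (↑idx : Int)) = false := by
      simp only [beq_eq_false_iff_ne, ne_eq, Nat.cast_inj]
      omega
    by_cases hc : i < s
    · have hget' : ((pre ++ [i]) ++ rest)[pre.length]? = some i := by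
        simp [List.append_assoc]
      obtain ⟨j, hj, hjl, hjg⟩ := ih (pre ++ [i]) i pre.length (by simp) hget'
      refine ⟨j, ?_, ?_, ?_⟩
      · have : cssFindMin (i :: rest) s (↑idx) (↑pre.length)
            = cssFindMin rest i (↑pre.length) (↑pre.length + 1) := by
          simp [cssFindMin, hne, hc]
        rw [this]
        have hlen : ((pre ++ [i]).length : Int) = (↑pre.length : Int) + 1 := by simp
        rw [← hlen] at *
        rw [hj]
        simp [min_eq_right (le_of_lt hc)]
      · simpa [List.append_assoc] using hjl
      · have : rest.foldl min i = (i :: rest).foldl min s := by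
          simp [List.foldl_cons, min_eq_right (le_of_lt hc)]
        rw [← this]
        simpa [List.append_assoc] using hjg
    · have hpre : pre[idx]? = some s := by
        rwa [List.getElem?_append, if_pos hlt] at hget
      have hget' : ((pre ++ [i]) ++ rest)[idx]? = some s := by
        rw [List.getElem?_append, if_pos (by simp; omega), List.getElem?_append, if_pos hlt]
        exact hpre
      obtain ⟨j, hj, hjl, hjg⟩ := ih (pre ++ [i]) s idx (by simp; omega) hget'
      refine ⟨j, ?_, ?_, ?_⟩
      · have : cssFindMin (i :: rest) s (↑idx) (↑pre.length)
            = cssFindMin rest s (↑idx) (↑pre.length + 1) := by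
          simp [cssFindMin, hne, hc]
        rw [this]
        have hlen : ((pre ++ [i]).length : Int) = (↑pre.length : Int) + 1 := by simp
        rw [← hlen]
        rw [hj]
        simp [min_eq_left (le_of_not_gt hc)]
      · simpa [List.append_assoc] using hjl
      · have : rest.foldl min s = (i :: rest).foldl min s := by
          simp [List.foldl_cons, min_eq_left (le_of_not_gt hc)]
        rw [← this]
        simpa [List.append_assoc] using hjg

theorem cssSortedStep (l : List Int) (j : Nat) (m : Int)
    (hj : j < l.length) (hget : l[j]? = some m) (hmin : ∀ y ∈ l, m ≤ y) :
    PySem.List.sorted l (fun x => x) false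
      = m :: PySem.List.sorted (l.eraseIdx j) (fun x => x) false := by
  have hgetE : l[j] = m := by
    have := List.getElem?_eq_getElem hj
    rw [hget] at this; exact (Option.some_inj.mp this).symm
  apply PySem.List.sorted_id_eq_of_perm_of_pairwise
  · -- permutation
    have h1 : (PySem.List.sorted (l.eraseIdx j) (fun x => x) false).Perm (l.eraseIdx j) :=
      PySem.List.sorted_perm _ _ _
    have h2 : (m :: l.eraseIdx j).Perm l := by
      have hl : l = List.take j l ++ m :: List.drop (j + 1) l := by
        conv_lhs => rw [← List.take_append_drop j l]
        rw [← List.getElem_cons_drop hj, hgetE]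
      conv_rhs => rw [hl]
      rw [List.eraseIdx_eq_take_drop_succ]
      exact (List.perm_middle).symm
    exact ((h1.cons m).trans h2)
  · -- pairwise ≤
    refine List.pairwise_cons.mpr ⟨?_, ?_⟩
    · intro y hy
      have : y ∈ l.eraseIdx j := (PySem.List.mem_sorted _ _ _ _).mp hy
      exact hmin y (List.mem_of_mem_eraseIdx this)
    · exact PySem.List.sorted_pairwise _ _

theorem cssLoop_eq_scan : ∀ (fuel : Nat) (l : List Int) (ns bs : Int),
    l.length ≤ fuel → ns < 4 →
    cssLoop fuel l ns bs = cssScan (PySem.List.sorted l (fun x => x) false) ns bs := by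
  intro fuel
  induction fuel with
  | zero =>
    intro l ns bs hlen hns
    have : l = [] := List.eq_nil_of_length_eq_zero (by omega)
    subst this
    simp [cssLoop, cssScan, PySem.List.sorted, if_neg (by omega : ¬ ns ≥ 4)]
  | succ fuel ih =>
    intro l ns bs hlen hns
    match l with
    | [] =>
      simp [cssLoop, cssScan, PySem.List.sorted, if_neg (by omega : ¬ ns ≥ 4)]
    | x :: xs =>
      -- first step of the inner scan skips position 0
      have hstep : cssFindMin (x :: xs) x 0 0 = cssFindMin xs x 0 1 := by
        simp [cssFindMin]
      obtain ⟨j, hj, hjl, hjg⟩ := cssFindMin_spec xs [x] x 0 (by simp) (by simp)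
      set m := xs.foldl min x with hm
      have hmin : ∀ y ∈ x :: xs, m ≤ y := by
        intro y hy
        obtain ⟨h1, h2⟩ := cssFoldlMin_le xs x
        rcases List.mem_cons.mp hy with h | h
        · exact h ▸ h1
        · exact h2 y h
      have hsorted : PySem.List.sorted (x :: xs) (fun x => x) false
          = m :: PySem.List.sorted ((x :: xs).eraseIdx j) (fun x => x) false := by
        apply cssSortedStep _ j m (by simpa using hjl) (by simpa using hjg) hmin
      have hfm : cssFindMin (x :: xs) x 0 0 = (m, (↑j : Int)) := by
        rw [hstep]
        simpa using hj
      rw [hsorted]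
      show (let r := cssFindMin (x :: xs) x 0 0;
        let ns' := if bs == 0 then 1 else if bs + 1 == r.1 then ns + 1 else 1;
        if ns' ≥ 4 then 30
        else cssLoop fuel ((x :: xs).eraseIdx r.2.toNat) ns' r.1) = _
      rw [hfm]
      simp only [cssScan]
      by_cases h4 : (if bs == 0 then (1:Int) else if bs + 1 == m then ns + 1 else 1) ≥ 4
      · simp only [if_pos h4]
      · simp only [if_neg h4, Int.toNat_natCast]
        apply ih
        · have : j < (x :: xs).length := by simpa using hjl
          rw [List.length_eraseIdx_of_lt this]
          simp at hlen ⊢; omega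
        · omega

-- ===== VERDICT (by name: the statement is the Claim_ definition above) =====
theorem checkSmallStraight_spec : Claim_equal_checkSmallStraight := by
  intro dies _
  unfold Spec_checkSmallStraight checkSmallStraight checkSmallStraight_alt
  exact cssLoop_eq_scan dies.length dies 0 0 le_rfl (by omega)
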